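-- pv_equiv track=rewrite | github.com/InCaseIDontCU/EquivaFormulation | utils/CG_cuts.py | insert_constraint_into_code
-- ===== SOURCE A (Python) =====
-- def insert_constraint_into_code(code_lines, gurobi_constraint_code):
--     insert_index = None
--     for i, line in enumerate(code_lines):
--         if "# Constraints" in line:
--             insert_index = i + 1
--         if "model.optimize()" in line and insert_index is None:
--             insert_index = i
--             break
--     if insert_index is None:
--         insert_index = len(code_lines)
--
--     code_lines.insert(insert_index, "# Added generated constraint\n")
--     code_lines.insert(insert_index+1, gurobi_constraint_code + "\n")
--     return code_lines
-- ===== SOURCE B (Python) =====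
-- def _match_indices(needle, lines):
--     return [i for i, line in enumerate(lines) if needle in line]
--
--
-- def insert_constraint_into_code(code_lines, gurobi_constraint_code):
--     opt = _match_indices("model.optimize()", code_lines)
--     con = _match_indices("# Constraints", code_lines)
--     if opt and (not con or opt[0] < con[0]):
--         idx = opt[0]
--     elif con:
--         idx = con[-1] + 1
--     else:
--         idx = len(code_lines)
--     code_lines.insert(idx, "# Added generated constraint\n")
--     code_lines.insert(idx + 1, gurobi_constraint_code + "\n")
--     return code_lines
-- ===== Notes on version B (the rewrite author's own statement) =====
-- stated objective: simpler
-- what changed: Replaces A's single stateful scan with break/None sentinel logic by two index-collecting comprehensions and one loop-free decision: first optimize index wins only if it precedes every '# Constraints' marker, else last marker + 1, else append at the end.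
import Mathlib
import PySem

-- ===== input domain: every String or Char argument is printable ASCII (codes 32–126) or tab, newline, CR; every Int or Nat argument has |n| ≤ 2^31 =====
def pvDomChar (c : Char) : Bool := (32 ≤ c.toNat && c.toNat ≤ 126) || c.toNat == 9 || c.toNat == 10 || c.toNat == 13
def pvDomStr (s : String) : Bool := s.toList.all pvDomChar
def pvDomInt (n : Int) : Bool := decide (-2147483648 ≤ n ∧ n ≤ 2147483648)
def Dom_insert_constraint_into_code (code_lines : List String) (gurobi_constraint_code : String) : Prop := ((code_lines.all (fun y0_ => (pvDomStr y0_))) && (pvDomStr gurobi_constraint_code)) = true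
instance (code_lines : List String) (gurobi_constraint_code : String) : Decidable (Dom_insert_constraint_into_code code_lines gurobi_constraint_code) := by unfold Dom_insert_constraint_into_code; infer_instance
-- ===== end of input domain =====

-- B replaces A's stateful break/None scan by two index-collecting passes and a loop-free
-- decision (objective: simpler). Both Pythons mutate code_lines in place in the same way,
-- so the in-place effect is identical too; the theorem below is about the returned list.

-- ===== PORT A =====
-- A's for-loop with `insert_index` (None-sentinel) and `break`, step for step.
def icicLoopA : List String → Int → Option Int → Option Int
  | [], _, acc => acc
  | line :: rest, i, acc =>
    let acc' := if PySem.Str.isIn "# Constraints" line then some (i + 1) else acc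
    if PySem.Str.isIn "model.optimize()" line && acc'.isNone then some i
    else icicLoopA rest (i + 1) acc'

def insert_constraint_into_code (code_lines : List String) (gurobi_constraint_code : String) : List String :=
  let insert_index : Int := (icicLoopA code_lines 0 none).getD (code_lines.length : Int)
  let code_lines := PySem.List.insert code_lines insert_index "# Added generated constraint\n"
  PySem.List.insert code_lines (insert_index + 1) (gurobi_constraint_code ++ "\n")

-- ===== PORT B =====
-- [i for i, line in enumerate(lines) if needle in line]
def icicMatchIndices (needle : String) (lines : List String) : List Int :=
  ((PySem.List.enumerate lines).filter (fun p => PySem.Str.isIn needle p.2)).map (fun p => p.1)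

def insert_constraint_into_code_alt (code_lines : List String) (gurobi_constraint_code : String) : List String :=
  let opt := icicMatchIndices "model.optimize()" code_lines
  let con := icicMatchIndices "# Constraints" code_lines
  let idx : Int :=
    if opt ≠ [] ∧ (con = [] ∨ opt.head! < con.head!) then opt.head!
    else if con ≠ [] then con.getLast! + 1
    else (code_lines.length : Int)
  let code_lines := PySem.List.insert code_lines idx "# Added generated constraint\n"
  PySem.List.insert code_lines (idx + 1) (gurobi_constraint_code ++ "\n")

-- ===== PRECONDITION & SPEC =====
def Spec_insert_constraint_into_code (code_lines : List String) (gurobi_constraint_code : String) (out : List String) : Prop := out = insert_constraint_into_code_alt code_lines gurobi_constraint_code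
instance (code_lines : List String) (gurobi_constraint_code : String) (out : List String) : Decidable (Spec_insert_constraint_into_code code_lines gurobi_constraint_code out) := by unfold Spec_insert_constraint_into_code; infer_instance

-- ===== CLAIM (what is proved, stated in full; the proofs are below) =====
def Claim_equal_insert_constraint_into_code : Prop := ∀ (code_lines : List String) (gurobi_constraint_code : String), Dom_insert_constraint_into_code code_lines gurobi_constraint_code → Spec_insert_constraint_into_code code_lines gurobi_constraint_code (insert_constraint_into_code code_lines gurobi_constraint_code)

-- ===== LEMMAS AND PROOFS =====

-- variant of icicMatchIndices with an explicit start offset, for induction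
def icicMatchFrom (needle : String) (lines : List String) (s : Int) : List Int :=
  ((PySem.List.enumerate lines s).filter (fun p => PySem.Str.isIn needle p.2)).map (fun p => p.1)

lemma icicMatchFrom_zero (needle : String) (lines : List String) :
    icicMatchFrom needle lines 0 = icicMatchIndices needle lines := rfl

lemma icicMatchFrom_nil (needle : String) (s : Int) : icicMatchFrom needle [] s = [] := rfl

lemma icicMatchFrom_cons (needle l : String) (rest : List String) (s : Int) :
    icicMatchFrom needle (l :: rest) s =
      if PySem.Str.isIn needle l then s :: icicMatchFrom needle rest (s + 1)
      else icicMatchFrom needle rest (s + 1) := by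
  cases h : PySem.Chars.isIn needle.toList l.toList <;>
    simp [icicMatchFrom, PySem.List.enumerate_cons, h]

lemma icicMatchFrom_cons_pos (needle l : String) (rest : List String) (s : Int)
    (h : PySem.Str.isIn needle l = true) :
    icicMatchFrom needle (l :: rest) s = s :: icicMatchFrom needle rest (s + 1) := by
  rw [icicMatchFrom_cons, h, if_pos rfl]

lemma icicMatchFrom_cons_neg (needle l : String) (rest : List String) (s : Int)
    (h : PySem.Str.isIn needle l = false) :
    icicMatchFrom needle (l :: rest) s = icicMatchFrom needle rest (s + 1) := by
  rw [icicMatchFrom_cons, h, if_neg (by simp)]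

lemma icicMatchFrom_ge (needle : String) (lines : List String) :
    ∀ (s x : Int), x ∈ icicMatchFrom needle lines s → s ≤ x := by
  induction lines with
  | nil => intro s x hx; simp [icicMatchFrom_nil] at hx
  | cons l rest ih =>
    intro s x hx
    rw [icicMatchFrom_cons] at hx
    split_ifs at hx with h
    · rcases List.mem_cons.mp hx with rfl | hx
      · exact le_refl x
      · exact le_trans (by omega) (ih (s + 1) x hx)
    · exact le_trans (by omega) (ih (s + 1) x hx)

lemma getLast!_cons (a : Int) (m : List Int) :
    (a :: m).getLast! = if m = [] then a else m.getLast! := by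
  cases m with
  | nil => simp
  | cons b t => simp [List.getLast!]

lemma getLast?_cons_ne (a : Int) (m : List Int) (hm : m ≠ []) :
    (a :: m).getLast? = m.getLast? := by
  cases m with
  | nil => exact absurd rfl hm
  | cons b t => simp

lemma icicLoopA_some (lines : List String) :
    ∀ (s j : Int), icicLoopA lines s (some j) =
      some (if icicMatchFrom "# Constraints" lines s = [] then j
            else (icicMatchFrom "# Constraints" lines s).getLast! + 1) := by
  induction lines with
  | nil => intro s j; simp [icicLoopA, icicMatchFrom_nil]
  | cons l rest ih =>
    intro s j
    cases hc : PySem.Str.isIn "# Constraints" l with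
    | false =>
      have hl : icicLoopA (l :: rest) s (some j) = icicLoopA rest (s + 1) (some j) := by
        simp only [icicLoopA, hc, Bool.false_eq_true, if_false, Option.isNone_some,
          Bool.and_false]
      have mc : icicMatchFrom "# Constraints" (l :: rest) s =
          icicMatchFrom "# Constraints" rest (s + 1) := by
        exact icicMatchFrom_cons_neg _ _ _ _ hc
      rw [hl, mc]
      exact ih (s + 1) j
    | true =>
      have hl : icicLoopA (l :: rest) s (some j) = icicLoopA rest (s + 1) (some (s + 1)) := by
        simp only [icicLoopA, hc, if_true, Option.isNone_some, Bool.and_false,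
          Bool.false_eq_true, if_false]
      have mc : icicMatchFrom "# Constraints" (l :: rest) s =
          s :: icicMatchFrom "# Constraints" rest (s + 1) := by
        exact icicMatchFrom_cons_pos _ _ _ _ hc
      rw [hl, mc, ih (s + 1) (s + 1), getLast!_cons]
      by_cases hm : icicMatchFrom "# Constraints" rest (s + 1) = [] <;> simp [hm]

lemma icicLoopA_none (lines : List String) :
    ∀ (s : Int), icicLoopA lines s none =
      match icicMatchFrom "model.optimize()" lines s, icicMatchFrom "# Constraints" lines s with
      | [], [] => none
      | o :: _, [] => some o
      | [], _ :: _ => some ((icicMatchFrom "# Constraints" lines s).getLast! + 1)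
      | o :: _, c :: _ => some (if o < c then o
          else (icicMatchFrom "# Constraints" lines s).getLast! + 1) := by
  induction lines with
  | nil => intro s; simp [icicLoopA, icicMatchFrom_nil]
  | cons l rest ih =>
    intro s
    cases hc : PySem.Str.isIn "# Constraints" l with
    | true =>
      have hl : icicLoopA (l :: rest) s none = icicLoopA rest (s + 1) (some (s + 1)) := by
        simp only [icicLoopA, hc, if_true, Option.isNone_some, Bool.and_false,
          Bool.false_eq_true, if_false]
      have mc : icicMatchFrom "# Constraints" (l :: rest) s =
          s :: icicMatchFrom "# Constraints" rest (s + 1) := by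
        exact icicMatchFrom_cons_pos _ _ _ _ hc
      rw [hl, icicLoopA_some rest (s + 1) (s + 1), mc]
      cases hp : PySem.Str.isIn "model.optimize()" l with
      | true =>
        have mo : icicMatchFrom "model.optimize()" (l :: rest) s =
            s :: icicMatchFrom "model.optimize()" rest (s + 1) := by
          exact icicMatchFrom_cons_pos _ _ _ _ hp
        rw [mo]
        by_cases hm : icicMatchFrom "# Constraints" rest (s + 1) = []
        · simp [hm]
        · simp [hm, getLast?_cons_ne _ _ hm]
      | false =>
        have mo : icicMatchFrom "model.optimize()" (l :: rest) s =
            icicMatchFrom "model.optimize()" rest (s + 1) := by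
          exact icicMatchFrom_cons_neg _ _ _ _ hp
        rw [mo]
        cases ho : icicMatchFrom "model.optimize()" rest (s + 1) with
        | nil =>
          by_cases hm : icicMatchFrom "# Constraints" rest (s + 1) = []
          · simp [hm]
          · simp [hm, getLast?_cons_ne _ _ hm]
        | cons o t =>
          have hos : s + 1 ≤ o :=
            icicMatchFrom_ge _ _ _ _ (ho ▸ List.mem_cons_self)
          by_cases hm : icicMatchFrom "# Constraints" rest (s + 1) = []
          · simp [hm, show ¬ o < s by omega]
          · simp [hm, show ¬ o < s by omega, getLast?_cons_ne _ _ hm]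
    | false =>
      have mc : icicMatchFrom "# Constraints" (l :: rest) s =
          icicMatchFrom "# Constraints" rest (s + 1) := by
        exact icicMatchFrom_cons_neg _ _ _ _ hc
      cases hp : PySem.Str.isIn "model.optimize()" l with
      | true =>
        have hl : icicLoopA (l :: rest) s none = some s := by
          simp only [icicLoopA, hc, hp, Bool.false_eq_true, if_false, Option.isNone_none,
            Bool.and_true, if_true]
        have mo : icicMatchFrom "model.optimize()" (l :: rest) s =
            s :: icicMatchFrom "model.optimize()" rest (s + 1) := by
          exact icicMatchFrom_cons_pos _ _ _ _ hp
        rw [hl, mo, mc]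
        cases hcon : icicMatchFrom "# Constraints" rest (s + 1) with
        | nil => simp
        | cons c t =>
          have hcs : s + 1 ≤ c :=
            icicMatchFrom_ge _ _ _ _ (hcon ▸ List.mem_cons_self)
          simp [show s < c by omega]
      | false =>
        have hl : icicLoopA (l :: rest) s none = icicLoopA rest (s + 1) none := by
          simp only [icicLoopA, hc, hp, Bool.false_eq_true, if_false, Option.isNone_none,
            Bool.false_and]
        have mo : icicMatchFrom "model.optimize()" (l :: rest) s =
            icicMatchFrom "model.optimize()" rest (s + 1) := by
          exact icicMatchFrom_cons_neg _ _ _ _ hp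
        rw [hl, mo, mc]
        exact ih (s + 1)

-- key index equality
lemma icic_idx_eq (cl : List String) :
    (icicLoopA cl 0 none).getD (cl.length : Int) =
      (let opt := icicMatchIndices "model.optimize()" cl
       let con := icicMatchIndices "# Constraints" cl
       if opt ≠ [] ∧ (con = [] ∨ opt.head! < con.head!) then opt.head!
       else if con ≠ [] then con.getLast! + 1
       else (cl.length : Int)) := by
  rw [icicLoopA_none cl 0]
  simp only [← icicMatchFrom_zero]
  cases ho : icicMatchFrom "model.optimize()" cl 0 with
  | nil =>
    cases hc : icicMatchFrom "# Constraints" cl 0 with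
    | nil => simp
    | cons c t => simp
  | cons o t =>
    cases hc : icicMatchFrom "# Constraints" cl 0 with
    | nil => simp
    | cons c u => by_cases h : o < c <;> simp [h]

-- ===== VERDICT (by name: the statement is the Claim_ definition above) =====
theorem insert_constraint_into_code_spec : Claim_equal_insert_constraint_into_code := by
  intro cl gcc _
  unfold Spec_insert_constraint_into_code insert_constraint_into_code insert_constraint_into_code_alt
  rw [icic_idx_eq]
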